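-- pv_equiv track=rewrite | github.com/raspberryice/gen-arg | zstagger/utils.py | get_pred_arg_mentions_io
-- ===== SOURCE A (Python) =====
-- def get_pred_arg_mentions_io(ex, tag2role):
--     mentions = set()
--     prev_tag = 0
--     cur_start = 0
--     cur_end = 0
--     for i in range(len(ex['pred_tags'])):
--         tag = ex['pred_tags'][i]
--         if tag > 0: # not a O-tag
--             if tag != prev_tag: # begin a new span
--                 if prev_tag > 0:
--                     # close the prev tag
--                     mentions.add((cur_start, cur_end, tag2role[prev_tag]))
--                 cur_start = i
--                 cur_end = i+1
--             else: # should be a continuation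
--                 cur_end = i+1
--         else: # tag is O
--             if prev_tag >0:
--                 mentions.add((cur_start, cur_end, tag2role[prev_tag]))
--
--         prev_tag = tag
--     # last tag
--     if prev_tag > 0:
--         mentions.add((cur_start, cur_end, tag2role[prev_tag]))
--
--     return mentions
-- ===== SOURCE B (Python) =====
-- def get_pred_arg_mentions_io(ex, tag2role):
--     tags = ex['pred_tags']
--     mentions = set()
--     i, n = 0, len(tags)
--     while i < n:
--         j = i + 1
--         while j < n and tags[j] == tags[i]:
--             j += 1
--         if tags[i] > 0:
--             mentions.add((i, j, tag2role[tags[i]]))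
--         i = j
--     return mentions
-- ===== Notes on version B (the rewrite author's own statement) =====
-- stated objective: simpler
-- what changed: Replaced the prev_tag/cur_start/cur_end state machine with duplicated span-closing logic (in-loop flush plus tail flush) by a run-scanning two-pointer loop: each maximal run of equal tags is found by an inner scan and emitted directly as (run start, run end, role) when its tag is positive.
import Mathlib
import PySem

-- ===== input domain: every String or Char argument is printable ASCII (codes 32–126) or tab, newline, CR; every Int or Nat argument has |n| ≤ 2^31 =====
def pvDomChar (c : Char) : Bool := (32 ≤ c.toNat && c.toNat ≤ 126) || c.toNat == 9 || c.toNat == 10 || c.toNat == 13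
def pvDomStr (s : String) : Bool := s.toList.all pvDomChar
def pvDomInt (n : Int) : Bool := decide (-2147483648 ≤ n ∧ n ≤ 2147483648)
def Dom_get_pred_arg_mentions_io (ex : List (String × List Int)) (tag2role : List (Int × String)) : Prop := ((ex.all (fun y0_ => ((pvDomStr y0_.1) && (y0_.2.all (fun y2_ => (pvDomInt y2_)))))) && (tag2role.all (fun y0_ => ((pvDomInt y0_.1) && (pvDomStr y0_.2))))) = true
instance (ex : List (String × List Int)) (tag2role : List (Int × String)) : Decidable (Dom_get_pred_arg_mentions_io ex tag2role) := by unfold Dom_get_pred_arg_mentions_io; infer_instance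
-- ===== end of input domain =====

-- B replaces A's prev_tag/cur_start/cur_end state machine (with its duplicated in-loop and
-- tail span-flush logic) by a run-scanning two-pointer loop: simpler, same O(n) cost.
-- Mentions is a Python set; A and B insert the same spans in the same order, so list equality holds.

-- ===== PORT A =====
-- tag2role[prev_tag]: dict lookup; KeyError (missing key) is excluded by Pre_, default "" is never the result there.
def pvRole (tag2role : List (Int × String)) (t : Int) : String :=
  PySem.Dict.getD (PySem.Dict.mk tag2role) t ""

-- state = (mentions, prev_tag, cur_start, cur_end)
def pvAState : Type := PySem.Set (Int × Int × String) × Int × Int × Int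

-- one iteration of A's for-loop, at index i with tag = ex['pred_tags'][i]
def pvABody (tag2role : List (Int × String)) (s : pvAState) (i : Int) (tag : Int) : pvAState :=
  match s with
  | (m, prev, cs, ce) =>
    if 0 < tag then
      if tag ≠ prev then
        ((if 0 < prev then PySem.Set.add m (cs, ce, pvRole tag2role prev) else m), tag, i, i + 1)
      else
        (m, tag, cs, i + 1)
    else
      ((if 0 < prev then PySem.Set.add m (cs, ce, pvRole tag2role prev) else m), tag, cs, ce)

-- the trailing "last tag" flush after the loop
def pvAFinish (tag2role : List (Int × String)) (s : pvAState) : PySem.Set (Int × Int × String) :=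
  if 0 < s.2.1 then PySem.Set.add s.1 (s.2.2.1, s.2.2.2, pvRole tag2role s.2.1) else s.1

def get_pred_arg_mentions_io (ex : List (String × List Int)) (tag2role : List (Int × String)) : List (Int × Int × String) :=
  -- ex['pred_tags'] (KeyError excluded by Pre_); for i in range(len(…)), reading …[i] each iteration
  pvAFinish tag2role
    ((PySem.List.pyRange 0 ((PySem.Dict.getD (PySem.Dict.mk ex) "pred_tags" []).length : Int) 1).foldl
      (fun s i => pvABody tag2role s i (PySem.List.pyGetD (PySem.Dict.getD (PySem.Dict.mk ex) "pred_tags" []) i 0))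
      (PySem.Set.empty, 0, 0, 0))

-- ===== PORT B =====
-- inner while loop 'while j < n and tags[j] == tags[i]: j += 1': length of the leading run of t
def pvRunLen (t : Int) : List Int → Nat
  | [] => 0
  | x :: xs => if x = t then pvRunLen t xs + 1 else 0

-- outer while loop: scan one maximal run, emit it if its tag is positive, jump to its end
def pvBLoop (tag2role : List (Int × String)) : List Int → Int → PySem.Set (Int × Int × String) → PySem.Set (Int × Int × String)
  | [], _, m => m
  | t :: rest, idx, m =>
      let r := pvRunLen t rest
      pvBLoop tag2role (rest.drop r) (idx + (r : Int) + 1)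
        (if 0 < t then PySem.Set.add m (idx, idx + (r : Int) + 1, pvRole tag2role t) else m)
  termination_by tags => tags.length
  decreasing_by simp

def get_pred_arg_mentions_io_alt (ex : List (String × List Int)) (tag2role : List (Int × String)) : List (Int × Int × String) :=
  pvBLoop tag2role (PySem.Dict.getD (PySem.Dict.mk ex) "pred_tags" []) 0 PySem.Set.empty

-- ===== PRECONDITION & SPEC =====
-- Pre_ excludes exactly the inputs where A raises KeyError: ex lacking the key 'pred_tags',
-- or a positive tag in ex['pred_tags'] missing from tag2role.
def Pre_get_pred_arg_mentions_io (ex : List (String × List Int)) (tag2role : List (Int × String)) : Prop :=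
  PySem.Dict.contains (PySem.Dict.mk ex) "pred_tags" = true ∧
  ∀ t ∈ PySem.Dict.getD (PySem.Dict.mk ex) "pred_tags" ([] : List Int),
    0 < t → PySem.Dict.contains (PySem.Dict.mk tag2role) t = true

instance (ex : List (String × List Int)) (tag2role : List (Int × String)) : Decidable (Pre_get_pred_arg_mentions_io ex tag2role) := by unfold Pre_get_pred_arg_mentions_io; infer_instance

def pvWitness_get_pred_arg_mentions_io : (List (String × List Int)) × (List (Int × String)) :=
  ([("pred_tags", [1, 1, 0, 2])], [(1, "arg1"), (2, "arg2")])

def Spec_get_pred_arg_mentions_io (ex : List (String × List Int)) (tag2role : List (Int × String)) (out : List (Int × Int × String)) : Prop := out = get_pred_arg_mentions_io_alt ex tag2role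
instance (ex : List (String × List Int)) (tag2role : List (Int × String)) (out : List (Int × Int × String)) : Decidable (Spec_get_pred_arg_mentions_io ex tag2role out) := by unfold Spec_get_pred_arg_mentions_io; infer_instance

-- ===== CLAIM (what is proved, stated in full; the proofs are below) =====
def Claim_equal_get_pred_arg_mentions_io : Prop := ∀ (ex : List (String × List Int)) (tag2role : List (Int × String)), Dom_get_pred_arg_mentions_io ex tag2role → Pre_get_pred_arg_mentions_io ex tag2role → Spec_get_pred_arg_mentions_io ex tag2role (get_pred_arg_mentions_io ex tag2role)

-- ===== LEMMAS AND PROOFS =====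

-- A's loop as a fold over an enumerated list of (index, tag) pairs
def pvALoop (tag2role : List (Int × String)) (l : List (Int × Int)) (s : pvAState) : pvAState :=
  l.foldl (fun s p => pvABody tag2role s p.1 p.2) s

-- 'for i in range(len(tags)): … tags[i] …' is a fold over enumerate(tags)
lemma pv_bridge {σ : Type} (tags : List Int) (f : σ → Int → Int → σ) :
    ∀ (n k : Nat), tags.length - k = n → ∀ (s : σ),
      (PySem.List.pyRange (k : Int) (tags.length : Int) 1).foldl
          (fun s i => f s i (PySem.List.pyGetD tags i 0)) s
        = (PySem.List.enumerate (tags.drop k) (k : Int)).foldl (fun s p => f s p.1 p.2) s := by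
  intro n
  induction n with
  | zero =>
    intro k hk s
    have hle : tags.length ≤ k := by omega
    rw [PySem.List.pyRange_one_eq_nil (by exact_mod_cast hle), List.drop_eq_nil_of_le hle]
    simp [PySem.List.enumerate]
  | succ n ih =>
    intro k hk s
    have hklt : k < tags.length := by omega
    rw [PySem.List.pyRange_one_cons (by exact_mod_cast hklt)]
    rw [List.drop_eq_getElem_cons hklt, PySem.List.enumerate_cons]
    simp only [List.foldl_cons]
    have hget : PySem.List.pyGetD tags (k : Int) 0 = tags[k] := by
      rw [PySem.List.pyGetD_natCast, List.getD_eq_getElem?_getD, List.getElem?_eq_getElem hklt]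
      rfl
    rw [hget]
    have := ih (k + 1) (by omega) (f s (k : Int) tags[k])
    push_cast at this ⊢
    exact this

-- unfolding equations for pvBLoop (well-founded recursion)
lemma pvBLoop_nil (tag2role : List (Int × String)) (j : Int) (m : PySem.Set (Int × Int × String)) :
    pvBLoop tag2role [] j m = m := by rw [pvBLoop]

lemma pvBLoop_cons (tag2role : List (Int × String)) (t : Int) (rest : List Int) (idx : Int)
    (m : PySem.Set (Int × Int × String)) :
    pvBLoop tag2role (t :: rest) idx m
      = pvBLoop tag2role (rest.drop (pvRunLen t rest)) (idx + (pvRunLen t rest : Int) + 1)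
          (if 0 < t then PySem.Set.add m (idx, idx + (pvRunLen t rest : Int) + 1, pvRole tag2role t) else m) := by
  rw [pvBLoop]

lemma pvRunLen_cons_self (t : Int) (rest : List Int) : pvRunLen t (t :: rest) = pvRunLen t rest + 1 := by
  simp [pvRunLen]

-- jumping over a non-positive run changes nothing in B
lemma pvBLoop_nonpos (tag2role : List (Int × String)) (t : Int) (ht : ¬ 0 < t)
    (rest : List Int) (j : Int) (m : PySem.Set (Int × Int × String)) :
    pvBLoop tag2role (t :: rest) j m = pvBLoop tag2role rest (j + 1) m := by
  rw [pvBLoop_cons]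
  simp only [if_neg ht]
  cases rest with
  | nil => simp [pvRunLen, pvBLoop_nil]
  | cons u rest2 =>
    by_cases hu : u = t
    · subst hu
      rw [pvBLoop_cons, pvRunLen_cons_self, List.drop_succ_cons, if_neg ht]
      push_cast
      ring_nf
    · simp [pvRunLen, hu]

-- the key invariant: A's state machine, fully flushed, equals B's run scanner.
-- First conjunct: state with prev_tag ≤ 0 (cs, ce are dead).  Second: mid-run state for
-- a positive prev: the pending span (cs, ·) closes at the end of prev's leading run.
lemma pv_key (tag2role : List (Int × String)) (tags : List Int) :
    ∀ (j : Int) (m : PySem.Set (Int × Int × String)) (prev cs ce : Int),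
      (prev ≤ 0 →
        pvAFinish tag2role (pvALoop tag2role (PySem.List.enumerate tags j) (m, prev, cs, ce))
          = pvBLoop tag2role tags j m)
      ∧ (0 < prev →
        pvAFinish tag2role (pvALoop tag2role (PySem.List.enumerate tags j) (m, prev, cs, j))
          = pvBLoop tag2role (tags.drop (pvRunLen prev tags)) (j + (pvRunLen prev tags : Int))
              (PySem.Set.add m (cs, j + (pvRunLen prev tags : Int), pvRole tag2role prev))) := by
  induction tags with
  | nil =>
    intro j m prev cs ce
    constructor
    · intro hp
      simp [pvALoop, PySem.List.enumerate, pvAFinish, pvBLoop_nil, not_lt.mpr hp]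
    · intro hp
      simp [pvALoop, PySem.List.enumerate, pvAFinish, pvBLoop_nil, hp, pvRunLen]
  | cons t rest ih =>
    intro j m prev cs ce
    constructor
    · -- prev ≤ 0
      intro hp
      rw [PySem.List.enumerate_cons]
      have hstep : pvALoop tag2role ((j, t) :: PySem.List.enumerate rest (j + 1)) (m, prev, cs, ce)
          = pvALoop tag2role (PySem.List.enumerate rest (j + 1)) (pvABody tag2role (m, prev, cs, ce) j t) := rfl
      rw [hstep]
      by_cases ht : 0 < t
      · -- enter a new run of t
        have hne : t ≠ prev := by omega
        have hbody : pvABody tag2role (m, prev, cs, ce) j t = (m, t, j, j + 1) := by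
          simp [pvABody, ht, hne, not_lt.mpr hp]
        rw [hbody]
        have h2 := (ih (j + 1) m t j (j + 1)).2 ht
        rw [h2, pvBLoop_cons]
        simp only [if_pos ht]
        ring_nf
      · -- a non-positive tag: nothing opens, nothing flushes
        have hbody : pvABody tag2role (m, prev, cs, ce) j t = (m, t, cs, ce) := by
          simp [pvABody, ht, not_lt.mpr hp]
        rw [hbody]
        have h1 := ((ih (j + 1) m t cs ce).1 (by omega))
        rw [h1, pvBLoop_nonpos tag2role t ht]
    · -- 0 < prev, mid-run with pending span (cs, j)
      intro hp
      rw [PySem.List.enumerate_cons]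
      have hstep : ∀ st, pvALoop tag2role ((j, t) :: PySem.List.enumerate rest (j + 1)) st
          = pvALoop tag2role (PySem.List.enumerate rest (j + 1)) (pvABody tag2role st j t) := fun _ => rfl
      rw [hstep]
      by_cases hteq : t = prev
      · -- continuation of the run
        subst hteq
        have hbody : pvABody tag2role (m, t, cs, j) j t = (m, t, cs, j + 1) := by
          simp [pvABody, hp]
        rw [hbody]
        have h2 := (ih (j + 1) m t cs (j + 1)).2 hp
        rw [h2, pvRunLen_cons_self, List.drop_succ_cons]
        push_cast
        ring_nf
      · have hr0 : pvRunLen prev (t :: rest) = 0 := by simp [pvRunLen, hteq]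
        rw [hr0]
        by_cases ht : 0 < t
        · -- adjacent distinct positive run: flush prev, open t
          have hbody : pvABody tag2role (m, prev, cs, j) j t
              = (PySem.Set.add m (cs, j, pvRole tag2role prev), t, j, j + 1) := by
            simp [pvABody, ht, hteq, hp]
          rw [hbody]
          have h2 := (ih (j + 1) (PySem.Set.add m (cs, j, pvRole tag2role prev)) t j (j + 1)).2 ht
          rw [h2, List.drop_zero, pvBLoop_cons]
          simp only [if_pos ht]
          ring_nf
        · -- O tag: flush prev
          have hbody : pvABody tag2role (m, prev, cs, j) j t
              = (PySem.Set.add m (cs, j, pvRole tag2role prev), t, cs, j) := by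
            simp [pvABody, ht, hp]
          rw [hbody]
          have h1 := (ih (j + 1) (PySem.Set.add m (cs, j, pvRole tag2role prev)) t cs j).1 (by omega)
          rw [h1, List.drop_zero, pvBLoop_nonpos tag2role t ht]
          simp

-- ===== VERDICT (by name: the statement is the Claim_ definition above) =====
theorem get_pred_arg_mentions_io_spec : Claim_equal_get_pred_arg_mentions_io := by
  intro ex tag2role _ _
  unfold Spec_get_pred_arg_mentions_io get_pred_arg_mentions_io get_pred_arg_mentions_io_alt
  generalize PySem.Dict.getD (PySem.Dict.mk ex) "pred_tags" ([] : List Int) = tags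
  have hb := pv_bridge tags (pvABody tag2role) tags.length 0 (by omega) (PySem.Set.empty, 0, 0, 0)
  simp only [Nat.cast_zero, List.drop_zero] at hb
  rw [hb]
  exact (pv_key tag2role tags 0 PySem.Set.empty 0 0 0).1 le_rfl
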